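-- pv_equiv track=rewrite | github.com/HighwayofLife/basketball-stats-tracker | app/utils/scorebook_parser.py | parse_scoring_notation
-- ===== SOURCE A (Python) =====
-- def parse_scoring_notation(notation: str) -> dict[str, int]:
--     """
--     Parse scoring notation string into basketball statistics.
--
--     Args:
--         notation: String containing scoring notation using:
--             - '1' = Made free throw
--             - 'x' = Missed free throw
--             - '2' = Made 2-point shot
--             - '-' = Missed 2-point shot
--             - '3' = Made 3-point shot
--             - '/' = Missed 3-point shot
--
--     Returns:
--         Dictionary with keys: ftm, fta, fg2m, fg2a, fg3m, fg3a
--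
--     Examples:
--         >>> parse_scoring_notation("22-1x")
--         {'ftm': 1, 'fta': 2, 'fg2m': 2, 'fg2a': 3, 'fg3m': 0, 'fg3a': 0}
--
--         >>> parse_scoring_notation("3/2")
--         {'ftm': 0, 'fta': 0, 'fg2m': 1, 'fg2a': 1, 'fg3m': 1, 'fg3a': 2}
--     """
--     if not notation:
--         return {"ftm": 0, "fta": 0, "fg2m": 0, "fg2a": 0, "fg3m": 0, "fg3a": 0}
--
--     # Initialize stats
--     stats = {
--         "ftm": 0,  # Free throws made
--         "fta": 0,  # Free throws attempted
--         "fg2m": 0,  # 2-point field goals made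
--         "fg2a": 0,  # 2-point field goals attempted
--         "fg3m": 0,  # 3-point field goals made
--         "fg3a": 0,  # 3-point field goals attempted
--     }
--
--     # Parse each character in the notation
--     for char in notation.lower():
--         if char == "1":
--             # Made free throw
--             stats["ftm"] += 1
--             stats["fta"] += 1
--         elif char == "x":
--             # Missed free throw
--             stats["fta"] += 1
--         elif char == "2":
--             # Made 2-point shot
--             stats["fg2m"] += 1
--             stats["fg2a"] += 1
--         elif char == "-":
--             # Missed 2-point shot
--             stats["fg2a"] += 1
--         elif char == "3":
--             # Made 3-point shot
--             stats["fg3m"] += 1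
--             stats["fg3a"] += 1
--         elif char == "/":
--             # Missed 3-point shot
--             stats["fg3a"] += 1
--         # Ignore any other characters (spaces, etc.)
--
--     return stats
-- ===== SOURCE B (Python) =====
-- def parse_scoring_notation(notation: str) -> dict[str, int]:
--     # Count-first: one tally of the lowercased characters, then closed-form assembly.
--     counts = {}
--     for ch in notation.lower():
--         counts[ch] = counts.get(ch, 0) + 1
--     c = counts.get
--     ftm = c("1", 0)
--     fg2m = c("2", 0)
--     fg3m = c("3", 0)
--     return {
--         "ftm": ftm,
--         "fta": ftm + c("x", 0),
--         "fg2m": fg2m,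
--         "fg2a": fg2m + c("-", 0),
--         "fg3m": fg3m,
--         "fg3a": fg3m + c("/", 0),
--     }
-- ===== Notes on version B (the rewrite author's own statement) =====
-- stated objective: simpler
-- what changed: Replaces the six-way per-character branching loop that increments a stats dict with a count-first decomposition: one tally of the lowercased characters into a frequency dict, then each output computed by closed-form arithmetic from the counts.
import Mathlib
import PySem

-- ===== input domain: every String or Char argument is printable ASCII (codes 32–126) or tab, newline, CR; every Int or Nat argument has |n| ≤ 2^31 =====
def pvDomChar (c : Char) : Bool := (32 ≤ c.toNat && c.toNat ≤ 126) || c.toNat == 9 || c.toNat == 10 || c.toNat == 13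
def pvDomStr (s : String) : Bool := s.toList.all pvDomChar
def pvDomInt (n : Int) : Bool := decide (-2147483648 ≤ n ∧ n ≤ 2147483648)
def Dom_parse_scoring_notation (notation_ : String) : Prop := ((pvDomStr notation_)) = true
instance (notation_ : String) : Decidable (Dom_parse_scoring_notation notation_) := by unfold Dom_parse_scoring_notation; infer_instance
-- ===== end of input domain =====

-- B replaces A's six-way branching loop over a stats dict by a count-first decomposition:
-- tally the lowercased characters once, then assemble each field by closed-form arithmetic (objective: simpler).


-- ===== PORT A =====
-- stats["k"] += 1 is ported as Dict.modify "k" 0 (·+1); the key is always present, so the default is never read.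
def pvStepA (d : PySem.Dict String Int) (ch : Char) : PySem.Dict String Int :=
  if ch = '1' then (d.modify "ftm" 0 (· + 1)).modify "fta" 0 (· + 1)
  else if ch = 'x' then d.modify "fta" 0 (· + 1)
  else if ch = '2' then (d.modify "fg2m" 0 (· + 1)).modify "fg2a" 0 (· + 1)
  else if ch = '-' then d.modify "fg2a" 0 (· + 1)
  else if ch = '3' then (d.modify "fg3m" 0 (· + 1)).modify "fg3a" 0 (· + 1)
  else if ch = '/' then d.modify "fg3a" 0 (· + 1)
  else d

def parse_scoring_notation (notation_ : String) : List (String × Int) :=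
  if notation_ = "" then
    [("ftm", 0), ("fta", 0), ("fg2m", 0), ("fg2a", 0), ("fg3m", 0), ("fg3a", 0)]
  else
    let stats : PySem.Dict String Int :=
      PySem.Dict.ofList [("ftm", 0), ("fta", 0), ("fg2m", 0), ("fg2a", 0), ("fg3m", 0), ("fg3a", 0)]
    ((PySem.Str.lower notation_).toList.foldl pvStepA stats).items

-- ===== PORT B =====
def parse_scoring_notation_alt (notation_ : String) : List (String × Int) :=
  let cs := (PySem.Str.lower notation_).toList
  let counts := cs.foldl (fun d x => d.insert x (d.getD x 0 + 1)) PySem.Dict.empty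
  let ftm := counts.getD '1' 0
  let fg2m := counts.getD '2' 0
  let fg3m := counts.getD '3' 0
  [("ftm", ftm), ("fta", ftm + counts.getD 'x' 0),
   ("fg2m", fg2m), ("fg2a", fg2m + counts.getD '-' 0),
   ("fg3m", fg3m), ("fg3a", fg3m + counts.getD '/' 0)]

-- ===== PRECONDITION & SPEC =====
def Spec_parse_scoring_notation (notation_ : String) (out : List (String × Int)) : Prop := out = parse_scoring_notation_alt notation_
instance (notation_ : String) (out : List (String × Int)) : Decidable (Spec_parse_scoring_notation notation_ out) := by unfold Spec_parse_scoring_notation; infer_instance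

-- ===== CLAIM (what is proved, stated in full; the proofs are below) =====
def Claim_equal_parse_scoring_notation : Prop := ∀ (notation_ : String), Dom_parse_scoring_notation notation_ → Spec_parse_scoring_notation notation_ (parse_scoring_notation notation_)

-- ===== LEMMAS AND PROOFS =====
def pvMk (a b c d e f : Int) : PySem.Dict String Int :=
  PySem.Dict.mk [("ftm", a), ("fta", b), ("fg2m", c), ("fg2a", d), ("fg3m", e), ("fg3a", f)]

theorem pvStepA_mk (ch : Char) (a b c d e f : Int) :
    pvStepA (pvMk a b c d e f) ch =
      if ch = '1' then pvMk (a + 1) (b + 1) c d e f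
      else if ch = 'x' then pvMk a (b + 1) c d e f
      else if ch = '2' then pvMk a b (c + 1) (d + 1) e f
      else if ch = '-' then pvMk a b c (d + 1) e f
      else if ch = '3' then pvMk a b c d (e + 1) (f + 1)
      else if ch = '/' then pvMk a b c d e (f + 1)
      else pvMk a b c d e f := by
  simp only [pvStepA, pvMk, PySem.Dict.modify]
  split_ifs <;> rfl

theorem pvFoldA (l : List Char) (a b c d e f : Int) :
    l.foldl pvStepA (pvMk a b c d e f) =
      pvMk (a + l.count '1') (b + l.count '1' + l.count 'x')
           (c + l.count '2') (d + l.count '2' + l.count '-')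
           (e + l.count '3') (f + l.count '3' + l.count '/') := by
  induction l generalizing a b c d e f with
  | nil => simp
  | cons x xs ih =>
    simp only [List.foldl_cons, pvStepA_mk]
    split_ifs with h1 h2 h3 h4 h5 h6 <;>
      (rw [ih]; simp_all [pvMk, PySem.Dict.mk.injEq]) <;> omega

-- ===== VERDICT (by name: the statement is the Claim_ definition above) =====
theorem parse_scoring_notation_spec : Claim_equal_parse_scoring_notation := by
  intro notation_ _
  unfold Spec_parse_scoring_notation parse_scoring_notation parse_scoring_notation_alt
  by_cases h : notation_ = ""
  · subst h; decide
  · simp only [if_neg h]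
    have : PySem.Dict.ofList [("ftm", (0:Int)), ("fta", 0), ("fg2m", 0), ("fg2a", 0), ("fg3m", 0), ("fg3a", 0)] = pvMk 0 0 0 0 0 0 := by decide
    rw [this, pvFoldA]
    simp [pvMk, PySem.Dict.getD_foldl_insert_add_one]
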